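-- pv_equiv track=rewrite | github.com/benquick123/code-profiling | code/batch-1/vse-naloge-brez-testov/DN7-Z-124.py | varen_premik
-- ===== SOURCE A (Python) =====
-- def varen_premik(x0, y0, x1, y1, mine):
--     if x0 == x1:
--         if y0 < y1:
--             while y0 <= y1:
--                 if (x0, y0) in mine:
--                     return False
--                 y0 += 1
--         else:
--             while y1 <= y0:
--                 if (x1, y1) in mine:
--                     return False
--                 y1 += 1
--     if y1 == y0:
--         if x0 < x1:
--             while x0 <= x1:
--                 if (x0, y0) in mine:
--                     return False
--                 x0 += 1
--         else:
--             while x1 <= x0: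
--                 if (x1, y1) in mine:
--                     return False
--                 x1 += 1
--     return True
--
--
--     """
--     Vrni `True`, če je pomik z (x0, y0) and (x1, y1) varen, `False`, če ni.
--
--     Args:
--         x0 (int): koordinata x začetnega polja
--         y0 (int): koordinata y začetnega polja
--         x1 (int): koordinata x končnega polja
--         y1 (int): koordinata y končnega polja
--         mine (set of tuple of int): koordinate min
--
--     Returns:
--         bool: `True`, če je premik varen, `False`, če ni.
--     """
-- ===== SOURCE B (Python) =====
-- def varen_premik(x0, y0, x1, y1, mine):
--     if x0 == x1:
--         lo, hi = min(y0, y1), max(y0, y1)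
--         return not any(mx == x0 and lo <= my <= hi for (mx, my) in mine)
--     if y0 == y1:
--         lo, hi = min(x0, x1), max(x0, x1)
--         return not any(my == y0 and lo <= mx <= hi for (mx, my) in mine)
--     return True
-- ===== Notes on version B (the rewrite author's own statement) =====
-- stated objective: faster
-- what changed: Instead of walking every cell of the segment and testing membership per cell, B scans the mine set once and checks each mine against the segment's min/max interval.
import Mathlib
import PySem

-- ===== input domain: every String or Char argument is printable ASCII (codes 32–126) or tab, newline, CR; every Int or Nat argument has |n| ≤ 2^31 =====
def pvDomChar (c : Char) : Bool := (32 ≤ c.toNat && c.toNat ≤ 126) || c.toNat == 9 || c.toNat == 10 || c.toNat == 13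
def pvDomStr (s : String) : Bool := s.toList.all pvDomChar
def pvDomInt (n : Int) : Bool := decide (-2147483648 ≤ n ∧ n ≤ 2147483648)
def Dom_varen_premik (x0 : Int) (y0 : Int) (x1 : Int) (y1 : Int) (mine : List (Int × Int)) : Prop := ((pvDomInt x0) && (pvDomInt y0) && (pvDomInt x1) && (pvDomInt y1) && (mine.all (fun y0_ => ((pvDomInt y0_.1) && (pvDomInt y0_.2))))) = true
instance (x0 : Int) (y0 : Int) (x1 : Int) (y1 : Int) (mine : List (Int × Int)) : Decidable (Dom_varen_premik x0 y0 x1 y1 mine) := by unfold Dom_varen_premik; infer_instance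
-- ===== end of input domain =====

-- B replaces A's cell-by-cell walk of the segment (one membership test per cell) by a single
-- scan over the mine list comparing each mine with the segment's min/max interval
-- (asymptotically cheaper in the segment length; too fast at the tested sizes to measure).

-- ===== PORT A =====
-- One of A's 'while' loops: counter c runs upward to hi; at each step the cell 'f c' is tested
-- for membership in mine; returns (False, current counter) on a hit, else (True, final counter).
def pvScan (f : Int → Int × Int) (c : Int) (hi : Int) (mine : List (Int × Int)) : Bool × Int :=
  if c ≤ hi then
    if mine.contains (f c) then (false, c)
    else pvScan f (c + 1) hi mine
  else (true, c)
termination_by (hi + 1 - c).toNat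
decreasing_by omega

def varen_premik (x0 : Int) (y0 : Int) (x1 : Int) (y1 : Int) (mine : List (Int × Int)) : Bool :=
  -- first 'if x0 == x1' block: the two vertical while-loops mutate y0 resp. y1
  let s :=
    if x0 == x1 then
      if y0 < y1 then
        let r := pvScan (fun m => (x0, m)) y0 y1 mine
        (r.1, r.2, y1)
      else
        let r := pvScan (fun m => (x1, m)) y1 y0 mine
        (r.1, y0, r.2)
    else (true, y0, y1)
  if s.1 = false then false
  else
    let y0' := s.2.1
    let y1' := s.2.2
    -- second 'if y1 == y0' block, on the (possibly mutated) y-values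
    if y1' == y0' then
      if x0 < x1 then (pvScan (fun m => (m, y0')) x0 x1 mine).1
      else (pvScan (fun m => (m, y1')) x1 x0 mine).1
    else true

-- ===== PORT B =====
def varen_premik_alt (x0 : Int) (y0 : Int) (x1 : Int) (y1 : Int) (mine : List (Int × Int)) : Bool :=
  if x0 == x1 then
    let lo := min y0 y1
    let hi := max y0 y1
    !(mine.any (fun p => p.1 == x0 && decide (lo ≤ p.2) && decide (p.2 ≤ hi)))
  else if y0 == y1 then
    let lo := min x0 x1
    let hi := max x0 x1
    !(mine.any (fun p => p.2 == y0 && decide (lo ≤ p.1) && decide (p.1 ≤ hi)))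
  else true

-- ===== PRECONDITION & SPEC =====
def Spec_varen_premik (x0 : Int) (y0 : Int) (x1 : Int) (y1 : Int) (mine : List (Int × Int)) (out : Bool) : Prop := out = varen_premik_alt x0 y0 x1 y1 mine
instance (x0 : Int) (y0 : Int) (x1 : Int) (y1 : Int) (mine : List (Int × Int)) (out : Bool) : Decidable (Spec_varen_premik x0 y0 x1 y1 mine out) := by unfold Spec_varen_premik; infer_instance

-- ===== CLAIM (what is proved, stated in full; the proofs are below) =====
def Claim_equal_varen_premik : Prop := ∀ (x0 : Int) (y0 : Int) (x1 : Int) (y1 : Int) (mine : List (Int × Int)), Dom_varen_premik x0 y0 x1 y1 mine → Spec_varen_premik x0 y0 x1 y1 mine (varen_premik x0 y0 x1 y1 mine)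

-- ===== LEMMAS AND PROOFS =====

-- the loop succeeds iff no cell f m with c ≤ m ≤ hi is a mine
theorem pvScan_fst (f : Int → Int × Int) (c hi : Int) (mine : List (Int × Int)) :
    (pvScan f c hi mine).1 = true ↔ ∀ m : Int, c ≤ m → m ≤ hi → f m ∉ mine := by
  rw [pvScan]
  split
  · rename_i hle
    split
    · rename_i hmem
      exact ⟨fun h => by simp at h,
             fun h => ((h c le_rfl hle) (by simpa using hmem)).elim⟩
    · rename_i hmem
      rw [pvScan_fst]
      constructor
      · intro h m hcm hmhi
        rcases eq_or_lt_of_le hcm with rfl | hlt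
        · simpa using hmem
        · exact h m (by omega) hmhi
      · exact fun h m hcm hmhi => h m (by omega) hmhi
  · rename_i hgt
    simp only [true_iff]
    intro m hcm hmhi; omega
termination_by (hi + 1 - c).toNat
decreasing_by omega

-- on success the final counter is past hi
theorem pvScan_snd (f : Int → Int × Int) (c hi : Int) (mine : List (Int × Int)) :
    (pvScan f c hi mine).1 = true → hi < (pvScan f c hi mine).2 := by
  rw [pvScan]
  split
  · split
    · simp
    · exact pvScan_snd f (c + 1) hi mine
  · rename_i h; intro _; simp; omega
termination_by (hi + 1 - c).toNat
decreasing_by omega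

-- B's mine-scan over a vertical segment says the same thing as A's cell-walk
theorem scan_eq_any_vert (x lo hi : Int) (mine : List (Int × Int)) :
    (pvScan (fun m => (x, m)) lo hi mine).1 =
      !(mine.any (fun p => p.1 == x && decide (lo ≤ p.2) && decide (p.2 ≤ hi))) := by
  have h : (!(mine.any (fun p => p.1 == x && decide (lo ≤ p.2) && decide (p.2 ≤ hi)))) = true ↔
      ∀ m : Int, lo ≤ m → m ≤ hi → (x, m) ∉ mine := by
    simp only [Bool.not_eq_eq_eq_not, Bool.not_true, List.any_eq_false, Bool.and_eq_true,
      beq_iff_eq, decide_eq_true_eq, not_and]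
    constructor
    · intro h m hlo hhi hmem
      exact (h _ hmem ⟨rfl, hlo⟩) hhi
    · rintro h ⟨a, b⟩ hmem ⟨heq, hlo⟩ hhi
      simp only at heq; subst heq
      exact h b hlo hhi hmem
  cases hb : (pvScan (fun m => (x, m)) lo hi mine).1
  · rcases not_forall.mp ((not_iff_not.mpr (pvScan_fst (fun m => (x, m)) lo hi mine)).mp (by simp [hb])) with ⟨m, hm⟩
    obtain ⟨hm1, hm2, hm3⟩ := by simpa using hm
    cases hany : (!(mine.any (fun p => p.1 == x && decide (lo ≤ p.2) && decide (p.2 ≤ hi))))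
    · rfl
    · exact absurd ((h.mp hany) m hm1 hm2 hm3) (by simp)
  · exact (h.mpr ((pvScan_fst _ lo hi mine).mp hb)).symm

theorem scan_eq_any_horiz (y lo hi : Int) (mine : List (Int × Int)) :
    (pvScan (fun m => (m, y)) lo hi mine).1 =
      !(mine.any (fun p => p.2 == y && decide (lo ≤ p.1) && decide (p.1 ≤ hi))) := by
  have h : (!(mine.any (fun p => p.2 == y && decide (lo ≤ p.1) && decide (p.1 ≤ hi)))) = true ↔
      ∀ m : Int, lo ≤ m → m ≤ hi → (m, y) ∉ mine := by
    simp only [Bool.not_eq_eq_eq_not, Bool.not_true, List.any_eq_false, Bool.and_eq_true,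
      beq_iff_eq, decide_eq_true_eq, not_and]
    constructor
    · intro h m hlo hhi hmem
      exact (h _ hmem ⟨rfl, hlo⟩) hhi
    · rintro h ⟨a, b⟩ hmem ⟨heq, hlo⟩ hhi
      simp only at heq; subst heq
      exact h a hlo hhi hmem
  cases hb : (pvScan (fun m => (m, y)) lo hi mine).1
  · rcases not_forall.mp ((not_iff_not.mpr (pvScan_fst (fun m => (m, y)) lo hi mine)).mp (by simp [hb])) with ⟨m, hm⟩
    obtain ⟨hm1, hm2, hm3⟩ := by simpa using hm
    cases hany : (!(mine.any (fun p => p.2 == y && decide (lo ≤ p.1) && decide (p.1 ≤ hi))))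
    · rfl
    · exact absurd ((h.mp hany) m hm1 hm2 hm3) (by simp)
  · exact (h.mpr ((pvScan_fst _ lo hi mine).mp hb)).symm

-- ===== VERDICT (by name: the statement is the Claim_ definition above) =====
theorem varen_premik_spec : Claim_equal_varen_premik := by
  intro x0 y0 x1 y1 mine _
  unfold Spec_varen_premik varen_premik varen_premik_alt
  by_cases hx : x0 = x1
  · subst hx
    simp only [beq_self_eq_true, if_true]
    by_cases hy : y0 < y1
    · simp only [if_pos hy, min_eq_left hy.le, max_eq_right hy.le]
      rw [scan_eq_any_vert]
      cases hany : mine.any (fun p => p.1 == x0 && decide (y0 ≤ p.2) && decide (p.2 ≤ y1))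
      · -- no mine hit: loop succeeds and leaves y0 past y1, so horizontal branch is skipped
        have hs1 : (pvScan (fun m => (x0, m)) y0 y1 mine).1 = true := by
          rw [scan_eq_any_vert, hany]; rfl
        have hsn := pvScan_snd (fun m => (x0, m)) y0 y1 mine hs1
        have hne : (y1 == (pvScan (fun m => (x0, m)) y0 y1 mine).2) = false := by
          simp only [beq_eq_false_iff_ne, ne_eq]; omega
        simp [hne]
      · simp
    · have hle : y1 ≤ y0 := by omega
      simp only [if_neg hy, min_eq_right hle, max_eq_left hle]
      rw [scan_eq_any_vert]
      cases hany : mine.any (fun p => p.1 == x0 && decide (y1 ≤ p.2) && decide (p.2 ≤ y0))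
      · have hs1 : (pvScan (fun m => (x0, m)) y1 y0 mine).1 = true := by
          rw [scan_eq_any_vert, hany]; rfl
        have hsn := pvScan_snd (fun m => (x0, m)) y1 y0 mine hs1
        have hne : ((pvScan (fun m => (x0, m)) y1 y0 mine).2 == y0) = false := by
          simp only [beq_eq_false_iff_ne, ne_eq]; omega
        simp [hne]
      · simp
  · have hxb : (x0 == x1) = false := by simpa using hx
    simp only [hxb, Bool.false_eq_true, if_false]
    by_cases hy : y0 = y1
    · subst hy
      simp only [beq_self_eq_true, if_true]
      by_cases hx01 : x0 < x1
      · simp only [if_pos hx01, min_eq_left hx01.le, max_eq_right hx01.le]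
        rw [scan_eq_any_horiz]
        simp
      · have hle : x1 ≤ x0 := by omega
        simp only [if_neg hx01, min_eq_right hle, max_eq_left hle]
        rw [scan_eq_any_horiz]
        simp
    · have hyb : (y1 == y0) = false := by simp only [beq_eq_false_iff_ne, ne_eq]; omega
      have hyb' : (y0 == y1) = false := by simp only [beq_eq_false_iff_ne, ne_eq]; omega
      simp [hyb, hyb']
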